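-- pv_equiv track=rewrite | github.com/thisisignitedoreo/tcbpp | main.py | convert
-- ===== SOURCE A (Python) =====
-- def convert(array: list) -> list:
--     old = array[0]
--     res = [[0, old]]
--     for k, i in enumerate(array):
--         if i != old:
--             res.append([k, i])
--         old = i
--     return res
-- ===== SOURCE B (Python) =====
-- def convert(array: list) -> list:
--     res = []
--     i = 0
--     n = len(array)
--     while i < n:
--         v = array[i]
--         j = i + 1
--         while j < n and array[j] == v:
--             j += 1
--         res.append([i, v])
--         i = j
--     return res
-- ===== Notes on version B (the rewrite author's own statement) =====
-- stated objective: alternative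
-- what changed: B scans maximal runs of equal values with a two-index while loop, emitting one (start index, value) pair per run, instead of seeding the result with the first element and comparing each element to its predecessor.
import Mathlib
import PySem

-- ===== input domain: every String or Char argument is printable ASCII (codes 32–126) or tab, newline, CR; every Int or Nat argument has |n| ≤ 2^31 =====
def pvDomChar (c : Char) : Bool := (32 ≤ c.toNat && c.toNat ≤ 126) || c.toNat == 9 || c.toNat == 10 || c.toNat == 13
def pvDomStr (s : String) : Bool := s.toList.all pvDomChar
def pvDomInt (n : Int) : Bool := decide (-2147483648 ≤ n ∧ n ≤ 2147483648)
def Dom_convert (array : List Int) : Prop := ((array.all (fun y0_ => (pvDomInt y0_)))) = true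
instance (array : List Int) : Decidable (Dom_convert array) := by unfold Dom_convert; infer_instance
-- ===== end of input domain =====

-- B scans maximal runs of equal values (two-index while loop) instead of comparing each element
-- element to its predecessor; same output, same O(n) cost (objective: alternative).

-- ===== PORT A =====
def convertStep (st : List (List Int) × Int) (p : Int × Int) : List (List Int) × Int :=
  (if p.2 ≠ st.2 then st.1 ++ [[p.1, p.2]] else st.1, p.2)

def convert (array : List Int) : List (List Int) :=
  match PySem.List.pyGet? array 0 with
  | none => []   -- unreachable under Pre_convert (Python raises IndexError here)
  | some old => ((PySem.List.enumerate array 0).foldl convertStep ([[0, old]], old)).1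

-- ===== PORT B =====
-- outer while: one step per run; inner while j advance = takeWhile/dropWhile on the tail
def convertAltGo (start : Int) : List Int → List (List Int)
  | [] => []
  | v :: rest =>
      [start, v] ::
        convertAltGo (start + 1 + ((rest.takeWhile (· == v)).length : Int))
          (rest.dropWhile (· == v))
termination_by l => l.length
decreasing_by
  exact Nat.lt_succ_of_le (rest.length_dropWhile_le _)

def convert_alt (array : List Int) : List (List Int) := convertAltGo 0 array

-- ===== PRECONDITION & SPEC =====
-- A reads the first element up front, so it raises IndexError on the empty list; Pre_ excludes exactly that.
def Pre_convert (array : List Int) : Prop := array ≠ []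
instance (array : List Int) : Decidable (Pre_convert array) := by unfold Pre_convert; infer_instance
def pvWitness_convert : List Int := [1, 1, 2]

def Spec_convert (array : List Int) (out : List (List Int)) : Prop := out = convert_alt array
instance (array : List Int) (out : List (List Int)) : Decidable (Spec_convert array out) := by unfold Spec_convert; infer_instance

-- ===== CLAIM (what is proved, stated in full; the proofs are below) =====
def Claim_equal_convert : Prop := ∀ (array : List Int), Dom_convert array → Pre_convert array → Spec_convert array (convert array)

-- ===== LEMMAS AND PROOFS =====

-- the list of [k, i] entries A appends while folding, as a recursive function
def changes : List (Int × Int) → Int → List (List Int)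
  | [], _ => []
  | (k, i) :: ps, old => (if i ≠ old then [[k, i]] else []) ++ changes ps i

theorem foldl_convertStep (ps : List (Int × Int)) :
    ∀ (res : List (List Int)) (old : Int),
      (ps.foldl convertStep (res, old)).1 = res ++ changes ps old := by
  induction ps with
  | nil => intro res old; simp [changes]
  | cons p ps ih =>
      intro res old
      obtain ⟨k, i⟩ := p
      by_cases h : i = old <;>
        simp [changes, convertStep, h, ih, List.append_assoc]

theorem changes_enumerate (l : List Int) :
    ∀ (k old : Int),
      changes (PySem.List.enumerate l k) old =
        convertAltGo (k + ((l.takeWhile (· == old)).length : Int)) (l.dropWhile (· == old)) := by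
  induction l with
  | nil => intro k old; simp [PySem.List.enumerate_nil, changes, convertAltGo]
  | cons x xs ih =>
      intro k old
      rw [PySem.List.enumerate_cons]
      by_cases h : x = old
      · subst h
        simp only [changes, ne_eq, not_true_eq_false, if_false, List.nil_append,
          List.takeWhile_cons, List.dropWhile_cons, beq_self_eq_true, if_true]
        rw [ih (k + 1) x]
        congr 1
        simp only [List.length_cons]
        push_cast
        ring
      · have hb : (x == old) = false := by simp [h]
        simp only [changes, ne_eq, h, not_false_eq_true, if_true,
          List.takeWhile_cons, List.dropWhile_cons, hb, Bool.false_eq_true, if_false]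
        rw [convertAltGo.eq_def]
        simp only [List.length_nil, Nat.cast_zero, add_zero, List.singleton_append,
          List.cons.injEq, true_and]
        rw [ih (k + 1) x]

-- ===== VERDICT (by name: the statement is the Claim_ definition above) =====
theorem convert_spec : Claim_equal_convert := by
  intro array _ hpre
  match array, hpre with
  | a :: rest, _ =>
    show convert (a :: rest) = convert_alt (a :: rest)
    have h0 : PySem.List.pyGet? (a :: rest) 0 = some a := by
      simp [PySem.List.pyGet?, PySem.List.pyIdx?]
    rw [convert, h0]
    show (List.foldl convertStep ([[0, a]], a) (PySem.List.enumerate (a :: rest))).1 =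
      convert_alt (a :: rest)
    rw [foldl_convertStep, changes_enumerate (a :: rest) 0 a]
    have hrhs : convertAltGo 0 (a :: rest) =
        [0, a] :: convertAltGo (0 + 1 + ((rest.takeWhile (· == a)).length : Int))
          (rest.dropWhile (· == a)) := by
      rw [convertAltGo.eq_def]
    rw [convert_alt, hrhs]
    simp only [List.takeWhile_cons, List.dropWhile_cons, beq_self_eq_true, if_true,
      List.singleton_append]
    congr 1
    simp only [List.length_cons]
    push_cast
    ring
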